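-- pv_equiv track=rewrite | github.com/BlocUnited-LLC/mozaiks-ai | workflows/Generator/tools/action_plan.py | _normalize_ui_components
-- ===== SOURCE A (Python) =====
-- from typing import Any, Dict, List, Optional, Annotated
--
-- def _coerce_str(value: Any, default: str = "") -> str:
--     return value if isinstance(value, str) else default
--
-- def _normalize_ui_components(value: Any) -> List[Dict[str, Any]]:
--     normalized: List[Dict[str, Any]] = []
--     if not isinstance(value, list):
--         return normalized
--
--     for idx, raw in enumerate(value):
--         if not isinstance(raw, dict):
--             continue
--         module_name = _coerce_str(raw.get("module_name"), f"Module {idx + 1}")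
--         agent = _coerce_str(raw.get("agent"), "Agent")
--         tool = _coerce_str(raw.get("tool"), f"tool_{idx + 1}")
--         label = _coerce_str(raw.get("label"))
--         component = _coerce_str(raw.get("component"))
--         display = _coerce_str(raw.get("display"), "inline")
--         ui_pattern = _coerce_str(raw.get("ui_pattern"), "single_step")
--         summary = _coerce_str(raw.get("summary"))
--
--         normalized.append(
--             {
--                 "module_name": module_name,
--                 "agent": agent,
--                 "tool": tool,
--                 "label": label,
--                 "component": component,
--                 "display": display,
--                 "ui_pattern": ui_pattern,
--                 "summary": summary,
--             }
--         )
--     return normalized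
-- ===== SOURCE B (Python) =====
-- def _merge_component(idx, raw):
--     # start from the fully-defaulted record, then overlay the recognized string fields of raw
--     merged = {
--         "module_name": f"Module {idx + 1}",
--         "agent": "Agent",
--         "tool": f"tool_{idx + 1}",
--         "label": "",
--         "component": "",
--         "display": "inline",
--         "ui_pattern": "single_step",
--         "summary": "",
--     }
--     for key, val in raw.items():
--         if key in merged and isinstance(val, str):
--             merged[key] = val
--     return merged
--
-- def _normalize_ui_components(value):
--     if not isinstance(value, list):
--         return []
--     return [_merge_component(idx, raw) for idx, raw in enumerate(value) if isinstance(raw, dict)]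
-- ===== Notes on version B (the rewrite author's own statement) =====
-- stated objective: alternative
-- what changed: Instead of extracting each of the eight fields from raw with a per-field get-with-default, B builds the fully-defaulted record first and then overlays it in one pass over raw's own items, keeping only recognized string-valued keys (template-plus-dict-merge instead of per-field coercion).
import Mathlib
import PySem

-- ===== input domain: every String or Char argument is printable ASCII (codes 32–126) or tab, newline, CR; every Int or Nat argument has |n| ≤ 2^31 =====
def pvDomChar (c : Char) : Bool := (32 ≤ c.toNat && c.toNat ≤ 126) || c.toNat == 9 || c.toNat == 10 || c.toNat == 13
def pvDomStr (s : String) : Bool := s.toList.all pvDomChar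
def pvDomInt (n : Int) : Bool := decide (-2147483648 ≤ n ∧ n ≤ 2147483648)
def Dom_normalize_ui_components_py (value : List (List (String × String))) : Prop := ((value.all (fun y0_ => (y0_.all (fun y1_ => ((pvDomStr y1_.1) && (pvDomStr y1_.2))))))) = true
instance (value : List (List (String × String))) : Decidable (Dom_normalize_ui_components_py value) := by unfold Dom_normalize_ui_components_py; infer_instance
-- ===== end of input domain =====

-- B builds the fully-defaulted record and overlays raw's recognized string fields in one pass over raw.items(), instead of A's eight per-field get-with-default extractions (alternative decomposition, same O(n) cost). Only return values are compared.


-- ===== PORT A =====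
-- normalized = []; for idx, raw in enumerate(value): ...eight _coerce_str(raw.get(k), default)...;
-- normalized.append({...}); return normalized.  On the typed domain every element is a dict of
-- strings, so the isinstance checks are vacuous and _coerce_str(raw.get(k), d) = raw.get(k, d).
def normalize_ui_components_py (value : List (List (String × String))) : List (List (String × String)) :=
  (PySem.List.enumerate value).foldl
    (fun normalized p =>
      let idx := p.1
      let raw := PySem.Dict.mk p.2
      let module_name := raw.getD "module_name" ("Module " ++ PySem.Int.toStr (idx + 1))
      let agent := raw.getD "agent" "Agent"
      let tool := raw.getD "tool" ("tool_" ++ PySem.Int.toStr (idx + 1))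
      let label := raw.getD "label" ""
      let component := raw.getD "component" ""
      let display := raw.getD "display" "inline"
      let ui_pattern := raw.getD "ui_pattern" "single_step"
      let summary := raw.getD "summary" ""
      normalized ++ [[("module_name", module_name), ("agent", agent), ("tool", tool),
                      ("label", label), ("component", component), ("display", display),
                      ("ui_pattern", ui_pattern), ("summary", summary)]])
    []

-- ===== PORT B =====
-- _merge_component: merged = {eight defaulted fields}; for key, val in raw.items():
--   if key in merged (and isinstance(val, str), vacuous here): merged[key] = val
def pvMergeComponent (idx : Int) (raw : List (String × String)) : List (String × String) :=
  (raw.foldl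
      (fun merged kv => if merged.contains kv.1 then merged.insert kv.1 kv.2 else merged)
      (PySem.Dict.mk
        [("module_name", "Module " ++ PySem.Int.toStr (idx + 1)),
         ("agent", "Agent"),
         ("tool", "tool_" ++ PySem.Int.toStr (idx + 1)),
         ("label", ""), ("component", ""), ("display", "inline"),
         ("ui_pattern", "single_step"), ("summary", "")])).items

-- [_merge_component(idx, raw) for idx, raw in enumerate(value) if isinstance(raw, dict)]
def normalize_ui_components_py_alt (value : List (List (String × String))) : List (List (String × String)) :=
  (PySem.List.enumerate value).map (fun p => pvMergeComponent p.1 p.2)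

-- ===== PRECONDITION & SPEC =====
-- Pre_ requires each inner association list to have distinct keys, as every Python dict does by
-- construction: duplicate-key lists represent no Python input (A's first-match lookup and B's
-- last-write-wins overlay only disagree on those unrepresentable lists).
def Pre_normalize_ui_components_py (value : List (List (String × String))) : Prop :=
  ∀ raw ∈ value, (raw.map Prod.fst).Nodup
instance (value : List (List (String × String))) : Decidable (Pre_normalize_ui_components_py value) := by unfold Pre_normalize_ui_components_py; infer_instance

def pvWitness_normalize_ui_components_py : (List (List (String × String))) :=
  [[("agent", "Coder"), ("label", "Run")], []]

def Spec_normalize_ui_components_py (value : List (List (String × String))) (out : List (List (String × String))) : Prop := out = normalize_ui_components_py_alt value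
instance (value : List (List (String × String))) (out : List (List (String × String))) : Decidable (Spec_normalize_ui_components_py value out) := by unfold Spec_normalize_ui_components_py; infer_instance

-- ===== CLAIM =====
def Claim_equal_normalize_ui_components_py : Prop := ∀ (value : List (List (String × String))), Dom_normalize_ui_components_py value → Pre_normalize_ui_components_py value → Spec_normalize_ui_components_py value (normalize_ui_components_py value)

-- ===== LEMMAS AND PROOFS =====

-- B's overlay loop over a duplicate-free raw, started from any dict, rewrites each entry of the
-- start dict to raw's value at that key when present (keys never grow: insert only on contains).
theorem pv_overlay_items (raw : List (String × String)) (d : PySem.Dict String String)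
    (h : (raw.map Prod.fst).Nodup) :
    (raw.foldl (fun m kv => if m.contains kv.1 then m.insert kv.1 kv.2 else m) d).items
      = d.items.map (fun p => (p.1, ((PySem.Dict.mk raw).get? p.1).getD p.2)) := by
  induction raw generalizing d with
  | nil =>
    simp [PySem.Dict.get?]
  | cons kv rest ih =>
    obtain ⟨k, v⟩ := kv
    simp only [List.map_cons, List.nodup_cons] at h
    obtain ⟨hk, hrest⟩ := h
    rw [List.foldl_cons, ih _ hrest]
    cases hc : PySem.Dict.contains d k with
    | true =>
      simp only [if_true]
      rw [PySem.Dict.items_insert_of_contains _ _ hc]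
      rw [List.map_map]
      apply List.map_congr_left
      intro p _
      by_cases hpk : p.1 = k
      · have hnone : (PySem.Dict.mk rest).get? k = none := by
          rw [PySem.Dict.get?_eq_none_iff_not_mem_keys]
          simpa [PySem.Dict.keys] using hk
        simp [Function.comp, hpk, PySem.Dict.get?_mk_cons, hnone]
      · simp [Function.comp, hpk, PySem.Dict.get?_mk_cons, Ne.symm hpk]
    | false =>
      simp only [Bool.false_eq_true, if_false]
      apply List.map_congr_left
      intro p hp
      have hpk : p.1 ≠ k := by
        intro he
        rw [← he] at hc
        have := (PySem.Dict.contains_iff_mem_keys d p.1).2 (PySem.Dict.mem_keys_of_mem_items _ hp)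
        rw [hc] at this
        exact Bool.false_ne_true this
      simp [PySem.Dict.get?_mk_cons, Ne.symm hpk]

-- per-element agreement: A's eight-field record equals B's merged record
theorem pv_elem_eq (idx : Int) (raw : List (String × String))
    (h : (raw.map Prod.fst).Nodup) :
    pvMergeComponent idx raw
      = [("module_name", (PySem.Dict.mk raw).getD "module_name" ("Module " ++ PySem.Int.toStr (idx + 1))),
         ("agent", (PySem.Dict.mk raw).getD "agent" "Agent"),
         ("tool", (PySem.Dict.mk raw).getD "tool" ("tool_" ++ PySem.Int.toStr (idx + 1))),
         ("label", (PySem.Dict.mk raw).getD "label" ""),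
         ("component", (PySem.Dict.mk raw).getD "component" ""),
         ("display", (PySem.Dict.mk raw).getD "display" "inline"),
         ("ui_pattern", (PySem.Dict.mk raw).getD "ui_pattern" "single_step"),
         ("summary", (PySem.Dict.mk raw).getD "summary" "")] := by
  unfold pvMergeComponent
  rw [pv_overlay_items raw _ h]
  simp [PySem.Dict.getD_eq_get?_getD]

-- ===== VERDICT =====
theorem normalize_ui_components_py_spec : Claim_equal_normalize_ui_components_py := by
  intro value _ hpre
  unfold Spec_normalize_ui_components_py normalize_ui_components_py normalize_ui_components_py_alt
  rw [PySem.List.foldl_append_singleton_eq_map]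
  apply List.map_congr_left
  intro p hp
  have hmem : p.2 ∈ value := by
    rcases (PySem.List.mem_enumerate_iff _ _ _).1 hp with ⟨k, hk, rfl⟩
    simp
  exact (pv_elem_eq p.1 p.2 (hpre p.2 hmem)).symm
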